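-- pv_equiv track=rewrite | github.com/ckoenigs/master_database_change | mapping_and_merging_into_hetionet/ctd/integration_chemical_phenotype.py | find_shortest_list_and_indices
-- ===== SOURCE A (Python) =====
-- def find_shortest_list_and_indices(list_of_lists):
--     shortest = min(list_of_lists, key=len)
--     all_with_the_same_length = [shortest]
--     shortest_length = len(shortest)
--     indices = [list_of_lists.index(shortest)]
--     counter = 0
--     for list_of_list in list_of_lists:
--         if len(list_of_list) == shortest_length:
--             if not list_of_list in all_with_the_same_length:
--                 all_with_the_same_length.append(list_of_list)
--                 indices.append(counter)
--         counter += 1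
--
--     return indices, all_with_the_same_length
-- ===== SOURCE B (Python) =====
-- def find_shortest_list_and_indices(list_of_lists):
--     # bucket sublists by length in one pass, then scan only the shortest bucket
--     buckets = {}
--     for i, lst in enumerate(list_of_lists):
--         buckets.setdefault(len(lst), []).append((i, lst))
--     m = min(buckets)
--     indices = []
--     collected = []
--     for i, lst in buckets[m]:
--         if lst not in collected:
--             indices.append(i)
--             collected.append(lst)
--     return indices, collected
-- ===== Notes on version B (the rewrite author's own statement) =====
-- stated objective: alternative
-- what changed: B groups the sublists by length into a dict of (index, sublist) buckets in one pass and deduplicates only the smallest-length bucket, instead of A's min-by-len followed by .index and a second membership-filtered scan over the whole list.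
import Mathlib
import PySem

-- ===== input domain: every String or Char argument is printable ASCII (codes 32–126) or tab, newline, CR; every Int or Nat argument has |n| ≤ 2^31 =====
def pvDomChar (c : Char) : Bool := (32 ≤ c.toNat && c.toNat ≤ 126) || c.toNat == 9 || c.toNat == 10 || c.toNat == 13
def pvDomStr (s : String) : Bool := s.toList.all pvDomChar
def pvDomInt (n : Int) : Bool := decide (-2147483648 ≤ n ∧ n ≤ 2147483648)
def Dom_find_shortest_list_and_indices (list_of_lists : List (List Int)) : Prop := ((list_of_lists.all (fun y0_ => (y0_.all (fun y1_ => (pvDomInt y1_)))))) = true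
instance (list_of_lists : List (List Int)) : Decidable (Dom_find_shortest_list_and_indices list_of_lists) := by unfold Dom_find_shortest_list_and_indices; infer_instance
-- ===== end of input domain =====

-- B buckets the sublists by length in one pass (dict keyed by length) and then scans only the
-- shortest bucket, instead of A's min-by-len plus .index plus a second full scan; objective: alternative.

-- ===== PORT A =====
def find_shortest_list_and_indices (list_of_lists : List (List Int)) : List Int × List (List Int) :=
  match PySem.List.min? list_of_lists (fun l => (l.length : Int)) with
  | none => ([], [])  -- unreachable under Pre_ (Python: min([]) raises ValueError)
  | some shortest =>
    let shortest_length : Int := (shortest.length : Int)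
    let indices : List Int := [(((PySem.List.index? list_of_lists shortest).getD 0 : Nat) : Int)]
    let s := list_of_lists.foldl
      (fun (s : List (List Int) × List Int × Int) l =>
        let s' := if (l.length : Int) = shortest_length then
            (if l ∈ s.1 then s else (s.1 ++ [l], s.2.1 ++ [s.2.2], s.2.2))
          else s
        (s'.1, s'.2.1, s'.2.2 + 1))
      ([shortest], indices, 0)
    (s.2.1, s.1)

-- ===== PORT B =====
def find_shortest_list_and_indices_alt (list_of_lists : List (List Int)) : List Int × List (List Int) :=
  let buckets : PySem.Dict Int (List (Int × List Int)) :=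
    (PySem.List.enumerate list_of_lists).foldl
      (fun d p => d.modify ((p.2.length : Int)) [] (fun b => b ++ [p])) PySem.Dict.empty
  match PySem.List.min? buckets.keys (fun k => k) with
  | none => ([], [])  -- unreachable under Pre_ (Python: min() on an empty dict raises ValueError)
  | some m =>
    (buckets.getD m []).foldl
      (fun (acc : List Int × List (List Int)) p =>
        if p.2 ∈ acc.2 then acc else (acc.1 ++ [p.1], acc.2 ++ [p.2]))
      ([], [])

-- ===== PRECONDITION & SPEC =====
-- Python A raises ValueError (min of an empty sequence) on []; excluded.
def Pre_find_shortest_list_and_indices (list_of_lists : List (List Int)) : Prop :=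
  list_of_lists ≠ []
instance (list_of_lists : List (List Int)) : Decidable (Pre_find_shortest_list_and_indices list_of_lists) := by
  unfold Pre_find_shortest_list_and_indices; infer_instance
def pvWitness_find_shortest_list_and_indices : List (List Int) := [[1, 2], [3]]

def Spec_find_shortest_list_and_indices (list_of_lists : List (List Int)) (out : List Int × List (List Int)) : Prop := out = find_shortest_list_and_indices_alt list_of_lists
instance (list_of_lists : List (List Int)) (out : List Int × List (List Int)) : Decidable (Spec_find_shortest_list_and_indices list_of_lists out) := by unfold Spec_find_shortest_list_and_indices; infer_instance

-- ===== CLAIM (what is proved, stated in full; the proofs are below) =====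
def Claim_equal_find_shortest_list_and_indices : Prop := ∀ (list_of_lists : List (List Int)), Dom_find_shortest_list_and_indices list_of_lists → Pre_find_shortest_list_and_indices list_of_lists → Spec_find_shortest_list_and_indices list_of_lists (find_shortest_list_and_indices list_of_lists)

-- ===== LEMMAS AND PROOFS =====

-- Python's min keeps the FIRST minimal element: the accumulator fold from `some a` over t
-- lands on an m that splits a :: t into a strictly-larger prefix and a not-smaller suffix.
lemma pv_minFold_split {α : Type} (key : α → Int) :
    ∀ (t : List α) (a : α), ∃ m pre suf,
      t.foldl (fun acc x => match acc with
        | none => some x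
        | some mm => if key x < key mm then some x else some mm) (some a) = some m ∧
      a :: t = pre ++ m :: suf ∧ (∀ y ∈ pre, key m < key y) ∧ (∀ y ∈ suf, key m ≤ key y) := by
  intro t
  induction t with
  | nil => intro a; exact ⟨a, [], [], rfl, rfl, by simp, by simp⟩
  | cons x r ih =>
    intro a
    by_cases h : key x < key a
    · obtain ⟨m, pre, suf, hfold, heq, hpre, hsuf⟩ := ih x
      have hmx : key m ≤ key x := by
        cases pre with
        | nil =>
          injection heq with h1 h2
          rw [← h1]
        | cons b bs =>
          rw [List.cons_append] at heq
          injection heq with h1 h2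
          exact le_of_lt (by rw [h1]; exact hpre b (by simp))
      refine ⟨m, a :: pre, suf, ?_, ?_, ?_, hsuf⟩
      · simpa [List.foldl_cons, h] using hfold
      · simp [heq]
      · intro y hy
        rcases List.mem_cons.mp hy with rfl | hy
        · exact lt_of_le_of_lt hmx h
        · exact hpre y hy
    · obtain ⟨m, pre, suf, hfold, heq, hpre, hsuf⟩ := ih a
      cases pre with
      | nil =>
        injection heq with h1 h2
        refine ⟨m, [], x :: r, ?_, by simp [← h1], by simp, ?_⟩
        · simpa [List.foldl_cons, h] using hfold
        · intro y hy
          rcases List.mem_cons.mp hy with rfl | hy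
          · rw [← h1]; exact le_of_not_gt h
          · exact hsuf y (h2 ▸ hy)
      | cons b bs =>
        rw [List.cons_append] at heq
        injection heq with h1 h2
        have hma : key m < key a := by rw [h1]; exact hpre b (by simp)
        refine ⟨m, a :: x :: bs, suf, ?_, ?_, ?_, hsuf⟩
        · simpa [List.foldl_cons, h] using hfold
        · simp [h2]
        · intro y hy
          rcases List.mem_cons.mp hy with rfl | hy
          · exact hma
          · rcases List.mem_cons.mp hy with rfl | hy
            · exact lt_of_lt_of_le hma (le_of_not_gt h)
            · exact hpre y (by simp [hy])

lemma pv_min?_split {α : Type} (key : α → Int) (xs : List α) (hne : xs ≠ []) :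
    ∃ m pre suf, PySem.List.min? xs key = some m ∧
      xs = pre ++ m :: suf ∧ (∀ y ∈ pre, key m < key y) ∧ (∀ y ∈ suf, key m ≤ key y) := by
  cases xs with
  | nil => exact absurd rfl hne
  | cons h t =>
    obtain ⟨m, pre, suf, hfold, heq, hpre, hsuf⟩ := pv_minFold_split key t h
    exact ⟨m, pre, suf, by simpa [PySem.List.min?, List.foldl] using hfold, heq, hpre, hsuf⟩

-- A's counter loop over the list IS the same loop over enumerate.
lemma pv_foldA_enum (m : Int) :
    ∀ (l : List (List Int)) (all : List (List Int)) (inds : List Int) (c : Int),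
    l.foldl (fun (s : List (List Int) × List Int × Int) x =>
        let s' := if (x.length : Int) = m then
            (if x ∈ s.1 then s else (s.1 ++ [x], s.2.1 ++ [s.2.2], s.2.2))
          else s
        (s'.1, s'.2.1, s'.2.2 + 1)) (all, inds, c)
    = (((PySem.List.enumerate l c).foldl
        (fun (s : List (List Int) × List Int) p =>
          if (p.2.length : Int) = m then
            (if p.2 ∈ s.1 then s else (s.1 ++ [p.2], s.2 ++ [p.1]))
          else s) (all, inds)).1,
       ((PySem.List.enumerate l c).foldl
        (fun (s : List (List Int) × List Int) p =>
          if (p.2.length : Int) = m then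
            (if p.2 ∈ s.1 then s else (s.1 ++ [p.2], s.2 ++ [p.1]))
          else s) (all, inds)).2,
       c + l.length) := by
  intro l
  induction l with
  | nil => intro all inds c; simp [PySem.List.enumerate_nil]
  | cons x r ih =>
    intro all inds c
    rw [PySem.List.enumerate_cons]
    by_cases h1 : (x.length : Int) = m
    · by_cases h2 : x ∈ all
      · simp only [List.foldl, h1, h2, if_pos]
        rw [ih]
        simp; omega
      · simp only [List.foldl, h1, h2, if_false, if_pos]
        rw [ih]
        simp; omega
    · simp only [List.foldl, h1, if_false]
      rw [ih]
      simp; omega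

-- A's dedup fold (state (all, indices)) is B's dedup fold (state (indices, collected)) with the
-- components swapped.
lemma pv_swap_fold :
    ∀ (F : List (Int × List Int)) (all : List (List Int)) (inds : List Int),
    F.foldl (fun (s : List (List Int) × List Int) p =>
        if p.2 ∈ s.1 then s else (s.1 ++ [p.2], s.2 ++ [p.1])) (all, inds)
    = ((F.foldl (fun (s : List Int × List (List Int)) p =>
        if p.2 ∈ s.2 then s else (s.1 ++ [p.1], s.2 ++ [p.2])) (inds, all)).2,
       (F.foldl (fun (s : List Int × List (List Int)) p =>
        if p.2 ∈ s.2 then s else (s.1 ++ [p.1], s.2 ++ [p.2])) (inds, all)).1) := by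
  intro F
  induction F with
  | nil => intros; rfl
  | cons p r ih =>
    intro all inds
    by_cases h : p.2 ∈ all
    · simp only [List.foldl, h, if_pos]
      exact ih all inds
    · simp only [List.foldl, h, if_false]
      exact ih (all ++ [p.2]) (inds ++ [p.1])

-- ===== VERDICT (by name: the statement is the Claim_ definition above) =====
theorem find_shortest_list_and_indices_spec : Claim_equal_find_shortest_list_and_indices := by
  intro xs _ hne
  unfold Spec_find_shortest_list_and_indices
  obtain ⟨shortest, pre, suf, hmin, heqs, hpreLt, hsufLe⟩ :=
    pv_min?_split (fun l => ((l.length : Int))) xs hne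
  simp only at hmin hpreLt hsufLe
  have hShortMem : shortest ∈ xs := by rw [heqs]; simp
  have hNotPre : shortest ∉ pre := fun hm => lt_irrefl _ (hpreLt shortest hm)
  have hIdx : PySem.List.index? xs shortest = some pre.length :=
    (PySem.List.index?_eq_some_iff xs shortest pre.length).mpr ⟨pre, suf, heqs, rfl, hNotPre⟩
  -- the filtered enumerate list both sides fold over
  have hq :
      (PySem.List.enumerate xs 0).filter (fun p => decide ((p.2.length : Int) = (shortest.length : Int)))
      = ((pre.length : Int), shortest) ::
        (PySem.List.enumerate suf ((pre.length : Int) + 1)).filter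
          (fun p => decide ((p.2.length : Int) = (shortest.length : Int))) := by
    rw [heqs, PySem.List.enumerate_append, List.filter_append, PySem.List.enumerate_cons]
    have h1 : (PySem.List.enumerate pre 0).filter
        (fun p => decide ((p.2.length : Int) = (shortest.length : Int))) = [] := by
      rw [List.filter_eq_nil_iff]
      intro p hp
      have hp2 : p.2 ∈ pre := by
        have := List.mem_map_of_mem (f := fun q : Int × List Int => q.2) hp
        rwa [PySem.List.map_snd_enumerate] at this
      have hlt := hpreLt p.2 hp2
      simp only [decide_eq_true_eq]
      omega
    rw [h1, List.filter_cons_of_pos (by simp)]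
    simp
  -- A reduces to a dedup fold over the filtered enumerate list
  have hA : find_shortest_list_and_indices xs =
      ((((PySem.List.enumerate xs 0).filter
          (fun p => decide ((p.2.length : Int) = (shortest.length : Int)))).foldl
        (fun (s : List (List Int) × List Int) p =>
          if p.2 ∈ s.1 then s else (s.1 ++ [p.2], s.2 ++ [p.1]))
        ([shortest], [(pre.length : Int)])).2,
       (((PySem.List.enumerate xs 0).filter
          (fun p => decide ((p.2.length : Int) = (shortest.length : Int)))).foldl
        (fun (s : List (List Int) × List Int) p =>
          if p.2 ∈ s.1 then s else (s.1 ++ [p.2], s.2 ++ [p.1]))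
        ([shortest], [(pre.length : Int)])).1) := by
    unfold find_shortest_list_and_indices
    rw [hmin]
    simp only [hIdx, Option.getD_some]
    rw [pv_foldA_enum (shortest.length : Int) xs [shortest] [(pre.length : Int)] 0]
    rw [PySem.List.foldl_ite_eq_foldl_filter
      (p := fun p : Int × List Int => (p.2.length : Int) = (shortest.length : Int))
      (f := fun (s : List (List Int) × List Int) p =>
        if p.2 ∈ s.1 then s else (s.1 ++ [p.2], s.2 ++ [p.1]))]
  -- B's bucket dict: keys and the smallest bucket
  have hkeys : ((PySem.List.enumerate xs).foldl
      (fun d p => d.modify ((p.2.length : Int)) [] (fun b => b ++ [p]))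
      (PySem.Dict.empty : PySem.Dict Int (List (Int × List Int)))).keys
      = PySem.Set.ofList ((PySem.List.enumerate xs 0).map (fun p => (p.2.length : Int))) := by
    rw [PySem.Dict.keys_foldl_modify_key (PySem.List.enumerate xs 0)
      (fun p : Int × List Int => (p.2.length : Int)) [] (fun _ p => fun b => b ++ [p])
      PySem.Dict.empty]
    rfl
  have hmemLen : ∀ y ∈ xs, ((y.length : Int)) ∈
      ((PySem.List.enumerate xs 0).map (fun p => (p.2.length : Int))) := by
    intro y hy
    rw [← PySem.List.map_snd_enumerate xs 0] at hy
    obtain ⟨p, hp, hp2⟩ := List.mem_map.mp hy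
    exact List.mem_map.mpr ⟨p, hp, by rw [hp2]⟩
  have hminB : PySem.List.min? (((PySem.List.enumerate xs).foldl
      (fun d p => d.modify ((p.2.length : Int)) [] (fun b => b ++ [p]))
      (PySem.Dict.empty : PySem.Dict Int (List (Int × List Int)))).keys)
      (fun k => k) = some (shortest.length : Int) := by
    cases hc : PySem.List.min? (((PySem.List.enumerate xs).foldl
        (fun d p => d.modify ((p.2.length : Int)) [] (fun b => b ++ [p]))
        (PySem.Dict.empty : PySem.Dict Int (List (Int × List Int)))).keys) (fun k => k) with
    | none =>
      exfalso
      have hk := (PySem.List.min?_eq_none_iff _ _).mp hc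
      rw [hkeys] at hk
      have := (PySem.Set.mem_ofList _ _).mpr (hmemLen shortest hShortMem)
      rw [hk] at this
      simp at this
    | some m' =>
      have hmem := PySem.List.min?_mem hc
      rw [hkeys, PySem.Set.mem_ofList] at hmem
      obtain ⟨p, hp, hp2⟩ := List.mem_map.mp hmem
      have hpx : p.2 ∈ xs := by
        have := List.mem_map_of_mem (f := fun q : Int × List Int => q.2) hp
        rwa [PySem.List.map_snd_enumerate] at this
      have h1 : (shortest.length : Int) ≤ m' := by
        have := PySem.List.min?_isMin hmin p.2 hpx
        simp only at this
        omega
      have h2 : m' ≤ (shortest.length : Int) := by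
        have := PySem.List.min?_isMin hc (shortest.length : Int)
          (by rw [hkeys]; exact (PySem.Set.mem_ofList _ _).mpr (hmemLen shortest hShortMem))
        simpa using this
      congr 1
      omega
  have hbucket : ((PySem.List.enumerate xs).foldl
      (fun d p => d.modify ((p.2.length : Int)) [] (fun b => b ++ [p]))
      (PySem.Dict.empty : PySem.Dict Int (List (Int × List Int)))).getD (shortest.length : Int) []
      = (PySem.List.enumerate xs 0).filter
          (fun p => decide ((p.2.length : Int) = (shortest.length : Int))) := by
    have h := PySem.Dict.getD_foldl_modify_append
      ((PySem.List.enumerate xs 0).map (fun p => ((p.2.length : Int), p)))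
      (PySem.Dict.empty : PySem.Dict Int (List (Int × List Int))) (shortest.length : Int)
    rw [List.foldl_map] at h
    simp only [PySem.Dict.getD_empty, List.nil_append] at h
    rw [h, List.filter_map, List.map_map]
    have : ∀ p ∈ PySem.List.enumerate xs 0,
        ((fun q : Int × (Int × List Int) => q.1 == (shortest.length : Int)) ∘
          (fun p : Int × List Int => ((p.2.length : Int), p))) p
        = (fun p : Int × List Int => decide ((p.2.length : Int) = (shortest.length : Int))) p := by
      intro p _
      rw [Bool.eq_iff_iff]
      simp
    rw [List.filter_congr this]
    simp [Function.comp_def]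
  -- B reduces to the mirrored dedup fold over the same list
  have hB : find_shortest_list_and_indices_alt xs =
      (((PySem.List.enumerate xs 0).filter
          (fun p => decide ((p.2.length : Int) = (shortest.length : Int)))).foldl
        (fun (acc : List Int × List (List Int)) p =>
          if p.2 ∈ acc.2 then acc else (acc.1 ++ [p.1], acc.2 ++ [p.2]))
        ([], [])) := by
    simp only [find_shortest_list_and_indices_alt, hminB]
    rw [hbucket]
  rw [hA, hB, hq]
  rw [List.foldl_cons, List.foldl_cons]
  rw [if_pos (by simp : shortest ∈ [shortest])]
  rw [if_neg (by simp : ¬ shortest ∈ ([] : List (List Int)))]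
  simp only [List.nil_append]
  rw [pv_swap_fold]
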